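-- pv_equiv track=rewrite | github.com/noaakayad/Python-Programs | List Comprehensions 2.py | string_lengths
-- ===== SOURCE A (Python) =====
-- def string_lengths(text, nums):
--     """
--     ##############################################################
--     # Here I first check if both 'text' and 'nums' are lists and if so I
--     check they both have the same lenght, if so, for each element of these
--     lists I see if they have the right type and if the strings aren't empty and
--     if the integers are positive.
--
--     If so, then I return the corresponding list comprehension.#
--     ##############################################################
--
--     >>> string_lengths(['a', 'b', 'c'], [1, 2])
--     Traceback (most recent call last):
--     ...
--     AssertionError
--     >>> string_lengths(['', 'abc'], [1, 2])
--     Traceback (most recent call last):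
--     ...
--     AssertionError
--     >>> string_lengths(['a', 'b'], [-1, 5])
--     Traceback (most recent call last):
--     ...
--     AssertionError
--     >>> string_lengths(['abc', 'abcd', 'abcde'], [2, 5, 5])
--     [True, False, False]
--
--     >>> string_lengths(['hello', 'world'], [5, 5])
--     [False, False]
--     >>> string_lengths(['hello', 'data'], [1, 3])
--     [True, True]
--     >>> string_lengths(['sun', 'moon', 'stars'], [0, 3, 5])
--     [True, True, False]
--     """
--     assert isinstance(text, list)
--     assert isinstance(nums, list)
--     assert len(text) == len(nums)
--     assert all(isinstance(text[i], str) for i in range(len(text)))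
--     assert all(text[i] != '' for i in range(len(text)))
--     assert all(isinstance(nums[i],int) and nums[i]>=0
--                for i in range(len(text)))
--
--     return [len(text[i]) > nums[i] for i in range(len(text))]
-- ===== SOURCE B (Python) =====
-- def string_lengths(text, nums):
--     # Different decomposition: consume working copies of the two lists as
--     # stacks from the BACK with pop(), validating each pair as it is popped
--     # and building the answer back-to-front, then reverse once at the end.
--     # Order of traversal does not matter: every validation failure is the
--     # same AssertionError, and the per-index values are independent.
--     assert isinstance(text, list)
--     assert isinstance(nums, list)
--     assert len(text) == len(nums)
--     ts = list(text)
--     ns = list(nums)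
--     res = []
--     while ts:
--         s = ts.pop()
--         n = ns.pop()
--         assert isinstance(s, str)
--         assert s != ''
--         assert isinstance(n, int) and n >= 0
--         res.append(len(s) > n)
--     res.reverse()
--     return res
-- ===== Notes on version B (the rewrite author's own statement) =====
-- stated objective: alternative
-- what changed: Instead of three separate all(...) index scans plus an index-based comprehension, B consumes working copies of the two lists as stacks from the back with pop(), validating each pair as it goes and building the output back-to-front, reversing once at the end.
import Mathlib
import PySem

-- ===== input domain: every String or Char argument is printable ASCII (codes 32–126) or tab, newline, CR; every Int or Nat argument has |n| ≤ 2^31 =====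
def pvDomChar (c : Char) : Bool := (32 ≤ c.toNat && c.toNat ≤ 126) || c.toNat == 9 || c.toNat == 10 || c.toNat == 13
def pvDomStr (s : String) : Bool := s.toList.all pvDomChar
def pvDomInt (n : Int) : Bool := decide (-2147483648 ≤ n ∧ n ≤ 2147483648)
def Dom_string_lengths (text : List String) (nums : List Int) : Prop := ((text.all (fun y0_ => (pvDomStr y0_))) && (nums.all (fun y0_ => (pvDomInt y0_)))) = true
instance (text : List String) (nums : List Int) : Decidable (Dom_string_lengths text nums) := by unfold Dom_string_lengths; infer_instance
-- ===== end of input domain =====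

-- B replaces A's staged all(...) scans + index comprehension by a stack-style
-- back-to-front consumption of the lists with one final reverse; equal return
-- values wherever A's asserts pass (Pre_).

-- ===== PORT A =====
-- asserts are reflected by Pre_string_lengths; the comprehension over range(len(text)):
def string_lengths (text : List String) (nums : List Int) : List Bool :=
  (PySem.List.pyRange 0 text.length 1).map
    (fun i => decide (((PySem.List.pyGetD text i "").length : Int) > PySem.List.pyGetD nums i 0))

-- ===== PORT B =====
-- Source B's while loop: pop from the back of both lists, append the comparison,
-- reverse at the end (ns.pop() cannot fail under the len-equality assert,
-- reflected in Pre_; getLastD is only a totalisation of that pop).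
def bLoop (ts : List String) (ns : List Int) (res : List Bool) : List Bool :=
  if ts.isEmpty then res.reverse
  else
    bLoop ts.dropLast ns.dropLast
      (res ++ [decide (((ts.getLastD "").length : Int) > ns.getLastD 0)])
termination_by ts.length
decreasing_by
  simp_all [List.isEmpty_iff, List.length_dropLast]
  cases ts <;> simp_all

def string_lengths_alt (text : List String) (nums : List Int) : List Bool :=
  bLoop text nums []

-- ===== PRECONDITION & SPEC =====
-- Pre_ excludes exactly the inputs where A's asserts raise AssertionError:
-- unequal lengths, an empty string, or a negative number (B's asserts raise there too).
def Pre_string_lengths (text : List String) (nums : List Int) : Prop :=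
  text.length = nums.length ∧ (∀ s ∈ text, s ≠ "") ∧ (∀ n ∈ nums, 0 ≤ n)
instance (text : List String) (nums : List Int) : Decidable (Pre_string_lengths text nums) := by unfold Pre_string_lengths; infer_instance

def pvWitness_string_lengths : List String × List Int := (["abc", "abcd"], [2, 5])

def Spec_string_lengths (text : List String) (nums : List Int) (out : List Bool) : Prop := out = string_lengths_alt text nums
instance (text : List String) (nums : List Int) (out : List Bool) : Decidable (Spec_string_lengths text nums out) := by unfold Spec_string_lengths; infer_instance

-- ===== CLAIM (what is proved, stated in full; the proofs are below) =====
def Claim_equal_string_lengths : Prop := ∀ (text : List String) (nums : List Int), Dom_string_lengths text nums → Pre_string_lengths text nums → Spec_string_lengths text nums (string_lengths text nums)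

-- ===== LEMMAS AND PROOFS =====

-- B's back-to-front consumption computes the forward elementwise map:
theorem bLoop_eq_map (k : Nat) : ∀ (ts : List String) (ns : List Int) (res : List Bool),
    ts.length = k → ts.length = ns.length →
    bLoop ts ns res =
      (ts.zip ns).map (fun p => decide ((p.1.length : Int) > p.2)) ++ res.reverse := by
  induction k with
  | zero =>
    intro ts ns res h _
    rw [List.length_eq_zero_iff] at h; subst h
    simp [bLoop]
  | succ k ih =>
    intro ts ns res h hlen
    have hts : ts ≠ [] := by intro e; subst e; simp at h
    have hns : ns ≠ [] := by intro e; subst e; simp at hlen; rw [hlen] at h; simp at h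
    rw [bLoop]
    simp only [List.isEmpty_iff, hts, ite_false]
    have hdl : ts.dropLast.length = k := by
      simp [List.length_dropLast, h]
    have hdl2 : ts.dropLast.length = ns.dropLast.length := by
      rw [List.length_dropLast, List.length_dropLast, hlen]
    rw [ih ts.dropLast ns.dropLast _ hdl hdl2]
    have hts2 : ts.dropLast ++ [ts.getLast hts] = ts := List.dropLast_append_getLast hts
    have hns2 : ns.dropLast ++ [ns.getLast hns] = ns := List.dropLast_append_getLast hns
    have hzip : ts.zip ns =
        ts.dropLast.zip ns.dropLast ++ [(ts.getLast hts, ns.getLast hns)] := by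
      conv_lhs => rw [← hts2, ← hns2]
      rw [List.zip_append (by rw [List.length_dropLast, List.length_dropLast, hlen])]
      rfl
    rw [hzip]
    simp [List.getLastD_eq_getLast?, List.getLast?_eq_some_getLast hts,
      List.getLast?_eq_some_getLast hns]

-- A's index comprehension also computes that map:
theorem portA_eq_map (text : List String) (nums : List Int)
    (hlen : text.length = nums.length) :
    string_lengths text nums =
      (text.zip nums).map (fun p => decide ((p.1.length : Int) > p.2)) := by
  unfold string_lengths
  apply List.ext_getElem
  · simp [PySem.List.length_pyRange_one, hlen]
  · intro k h1 h2
    have hk : k < text.length := by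
      simpa [PySem.List.length_pyRange_one] using h1
    have hkn : k < nums.length := hlen ▸ hk
    simp only [List.getElem_map, List.getElem_zip]
    rw [PySem.List.getElem_pyRange_one]
    simp only [zero_add]
    rw [PySem.List.pyGetD_eq_getElem text _ (Int.natCast_nonneg k) (by exact_mod_cast hk),
        PySem.List.pyGetD_eq_getElem nums _ (Int.natCast_nonneg k) (by exact_mod_cast hkn)]
    simp

-- ===== VERDICT (by name: the statement is the Claim_ definition above) =====
theorem string_lengths_spec : Claim_equal_string_lengths := by
  intro text nums _ hpre
  unfold Spec_string_lengths string_lengths_alt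
  rw [portA_eq_map text nums hpre.1, bLoop_eq_map text.length text nums [] rfl hpre.1]
  simp
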